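-- pv_equiv track=rewrite | github.com/Esther194/Personalized-Typing-Focus-Analyzer | main.py | keys_to_string
-- ===== SOURCE A (Python) =====
-- def keys_to_string(keys):
--     #將按鍵序列轉換為文字
--     result = ""
--     for key in keys:
--         if key == 'backspace':
--             if result:
--                 result = result[:-1]
--         elif key == 'enter':
--             result += '\n'
--         elif key == 'space':
--             result += ' '
--         elif key == 'tab':
--             result += '\t'
--         elif len(key) == 1:
--             result += key
--     return result
-- ===== SOURCE B (Python) =====
-- def keys_to_string(keys):
--     # Reverse single pass: cancel each backspace against the nearest
--     # preceding emitted character via a pending-deletion counter.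
--     skip = 0
--     out = []
--     for key in reversed(keys):
--         if key == 'backspace':
--             skip += 1
--         else:
--             ch = {'enter': '\n', 'space': ' ', 'tab': '\t'}.get(key)
--             if ch is None and len(key) == 1:
--                 ch = key
--             if ch is not None:
--                 if skip > 0:
--                     skip -= 1
--                 else:
--                     out.append(ch)
--     return ''.join(reversed(out))
-- ===== Notes on version B (the rewrite author's own statement) =====
-- stated objective: alternative
-- what changed: Replaces the forward pass that repeatedly truncates the accumulated string on backspace with a single reverse pass keeping a pending-deletion counter, collecting surviving characters and reversing once at the end.
import Mathlib
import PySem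

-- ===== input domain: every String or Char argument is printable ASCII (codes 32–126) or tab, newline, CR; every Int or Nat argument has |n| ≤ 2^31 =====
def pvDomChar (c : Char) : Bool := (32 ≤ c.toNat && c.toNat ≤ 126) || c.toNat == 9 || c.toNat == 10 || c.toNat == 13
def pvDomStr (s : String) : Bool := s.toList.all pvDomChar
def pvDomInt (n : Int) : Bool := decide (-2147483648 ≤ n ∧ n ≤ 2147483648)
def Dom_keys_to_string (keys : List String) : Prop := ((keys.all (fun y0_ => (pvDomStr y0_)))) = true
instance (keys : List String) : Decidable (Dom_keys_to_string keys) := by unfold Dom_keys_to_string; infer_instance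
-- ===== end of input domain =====

-- B replaces A's forward pass (truncate-on-backspace) by a single reverse pass with a
-- pending-deletion counter; return values proved equal on all inputs (alternative decomposition).

-- ===== PORT A =====
-- the growing string is carried as its List Char; result[:-1] under the `if result`
-- guard is exactly List.dropLast, and `result += s` is acc ++ s.toList (exact)
def keys_to_string_A_step (acc : List Char) (key : String) : List Char :=
  if key == "backspace" then
    (if acc ≠ [] then acc.dropLast else acc)
  else if key == "enter" then acc ++ ['\n']
  else if key == "space" then acc ++ [' ']
  else if key == "tab" then acc ++ ['\t']
  else if key.toList.length == 1 then acc ++ key.toList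
  else acc

def keys_to_string (keys : List String) : String :=
  String.ofList (keys.foldl keys_to_string_A_step [])

-- ===== PORT B =====
-- the dict .get plus the len==1 fallback of Source B
def pyEmit (key : String) : Option Char :=
  if key == "enter" then some '\n'
  else if key == "space" then some ' '
  else if key == "tab" then some '\t'
  else match key.toList with
       | [c] => some c
       | _ => none

def keys_to_string_B_step (st : Nat × List Char) (key : String) : Nat × List Char :=
  if key == "backspace" then (st.1 + 1, st.2)
  else match pyEmit key with
       | some c => if st.1 > 0 then (st.1 - 1, st.2) else (st.1, st.2 ++ [c])
       | none => st

def keys_to_string_alt (keys : List String) : String :=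
  let st := keys.reverse.foldl keys_to_string_B_step (0, [])
  String.ofList st.2.reverse

-- ===== PRECONDITION & SPEC =====
def Spec_keys_to_string (keys : List String) (out : String) : Prop := out = keys_to_string_alt keys
instance (keys : List String) (out : String) : Decidable (Spec_keys_to_string keys out) := by unfold Spec_keys_to_string; infer_instance

-- ===== CLAIM (what is proved, stated in full; the proofs are below) =====
def Claim_equal_keys_to_string : Prop := ∀ (keys : List String), Dom_keys_to_string keys → Spec_keys_to_string keys (keys_to_string keys)

-- ===== LEMMAS AND PROOFS =====

-- cons-variant of B's step, used as a foldr to reason about the reverse traversal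
def pvGR (key : String) (st : Nat × List Char) : Nat × List Char :=
  if key == "backspace" then (st.1 + 1, st.2)
  else match pyEmit key with
       | some c => if st.1 > 0 then (st.1 - 1, st.2) else (st.1, c :: st.2)
       | none => st

def pvDropLastN : Nat → List Char → List Char
  | 0, l => l
  | n+1, l => pvDropLastN n l.dropLast

theorem pvDropLastN_nil (n : Nat) : pvDropLastN n [] = [] := by
  induction n with
  | zero => rfl
  | succ n ih => simpa [pvDropLastN] using ih

theorem pvDropLastN_concat (n : Nat) (l : List Char) (c : Char) :
    pvDropLastN (n + 1) (l ++ [c]) = pvDropLastN n l := by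
  simp [pvDropLastN]

theorem stepA_emit (acc : List Char) (key : String) (h : ¬ key = "backspace") :
    keys_to_string_A_step acc key = acc ++ (pyEmit key).toList := by
  unfold keys_to_string_A_step pyEmit
  simp only [beq_iff_eq, h, if_false]
  by_cases h1 : key = "enter"
  · simp [h1]
  by_cases h2 : key = "space"
  · simp [h2]
  by_cases h3 : key = "tab"
  · simp [h3]
  simp only [h1, h2, h3, if_false]
  cases key.toList with
  | nil => simp
  | cons c t =>
    cases t with
    | nil => simp
    | cons d u => simp

-- B's foldl over the reversed list equals the foldr of the cons-variant
theorem foldl_rev_eq_foldr (l : List String) (s : Nat) (o : List Char) :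
    l.reverse.foldl keys_to_string_B_step (s, o) =
      ((l.foldr pvGR (s, [])).1, o ++ (l.foldr pvGR (s, [])).2.reverse) := by
  induction l generalizing o with
  | nil => simp
  | cons key rest ih =>
    simp only [List.reverse_cons, List.foldl_append, List.foldl_cons, List.foldl_nil,
      List.foldr_cons, ih]
    rcases hF : List.foldr pvGR (s, []) rest with ⟨n, t⟩
    show keys_to_string_B_step (n, o ++ t.reverse) key = _
    by_cases hb : key = "backspace"
    · simp [keys_to_string_B_step, pvGR, hb]
    · cases hc : pyEmit key with
      | none => simp [keys_to_string_B_step, pvGR, hb, hc]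
      | some c =>
        by_cases hn : n > 0
        · simp [keys_to_string_B_step, pvGR, hb, hc, hn]
        · simp [keys_to_string_B_step, pvGR, hb, hc, hn]

-- the forward stack fold equals: drop `skip` trailing chars of the accumulator, append survivors
theorem foldA_eq (keys : List String) (acc : List Char) :
    keys.foldl keys_to_string_A_step acc =
      pvDropLastN (keys.foldr pvGR (0, [])).1 acc ++ (keys.foldr pvGR (0, [])).2 := by
  induction keys generalizing acc with
  | nil => simp [pvDropLastN]
  | cons key rest ih =>
    simp only [List.foldl_cons, List.foldr_cons, ih]
    rcases hF : List.foldr pvGR (0, []) rest with ⟨n, t⟩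
    by_cases hb : key = "backspace"
    · have hstep : keys_to_string_A_step acc key = acc.dropLast := by
        unfold keys_to_string_A_step
        by_cases hn : acc = []
        · simp [hb, hn]
        · simp [hb, hn]
      rw [hstep]
      simp only [pvGR, hb, beq_self_eq_true, if_true]
      rfl
    · rw [stepA_emit acc key hb]
      cases hc : pyEmit key with
      | none => simp [pvGR, hb, hc]
      | some c =>
        by_cases hn : n > 0
        · obtain ⟨m, hm⟩ : ∃ m, n = m + 1 := ⟨n - 1, by omega⟩
          subst hm
          simp only [pvGR, hb, beq_iff_eq, if_false, hc, Option.toList_some,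
            Nat.succ_sub_one, if_pos (Nat.succ_pos m)]
          rw [pvDropLastN_concat]
        · have h0 : n = 0 := by omega
          simp [pvGR, hb, hc, h0, pvDropLastN]

-- ===== VERDICT (by name: the statement is the Claim_ definition above) =====
theorem keys_to_string_spec : Claim_equal_keys_to_string := by
  intro keys _
  unfold Spec_keys_to_string keys_to_string keys_to_string_alt
  rw [foldA_eq keys [], foldl_rev_eq_foldr keys 0 []]
  simp [pvDropLastN_nil]
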